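-- pv_equiv track=rewrite | github.com/Auto-Mech/mechanalyzer | mechanalyzer/mechanalyzer/calculator/_conn.py | _well_locations
-- ===== SOURCE A (Python) =====
-- def _well_locations(well_lst_dct, spc_lst_dct):
--     """ Taking a list of all the wells (from multichannel PESs)
--
--         We determine what PESs the species that comprise these
--         wells exist in.
--
--         first get wells_in_pes = {well: [idx_lst]}
--
--         dct = {name: (idx1, idx2, ..., idx3)}
--     """
--
--     # Just build a list of wells
--     wells = []
--     for well_lst in well_lst_dct.values():
--         wells.extend(well_lst)
--
--     # Determine what PESs a well exists inside of
--     wells_in_pes = {}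
--     for well in wells:
--         form_lst = []
--         for pes_form, spc_lst in spc_lst_dct.items():
--             if well in spc_lst:
--                 form_lst.append(pes_form)
--         wells_in_pes.update({well: form_lst})
--
--     # Trim to wells on multiple surfaces
--     msurf_wells = {well: forms
--                    for (well, forms) in wells_in_pes.items()
--                    if len(forms) > 1}
--
--     return msurf_wells
-- ===== SOURCE B (Python) =====
-- def _well_locations(well_lst_dct, spc_lst_dct):
--     """Index each species by the PES forms whose species list contains it
--     (one pass over spc_lst_dct), then answer each well with an O(1) lookup."""
--
--     # species -> list of PES forms whose spc_lst contains it
--     spc_forms = {}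
--     for pes_form, spc_lst in spc_lst_dct.items():
--         for spc in dict.fromkeys(spc_lst):
--             spc_forms.setdefault(spc, []).append(pes_form)
--
--     # Wells on more than one surface, in well order of first appearance
--     msurf_wells = {}
--     for well_lst in well_lst_dct.values():
--         for well in well_lst:
--             forms = spc_forms.get(well, [])
--             if len(forms) > 1:
--                 msurf_wells[well] = forms
--     return msurf_wells
-- ===== Notes on version B (the rewrite author's own statement) =====
-- stated objective: faster
-- what changed: Instead of scanning every spc_lst for every well (W*P*L), B builds a species->forms dictionary in one pass over spc_lst_dct and then answers each well with an O(1) dict lookup.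
import Mathlib
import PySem

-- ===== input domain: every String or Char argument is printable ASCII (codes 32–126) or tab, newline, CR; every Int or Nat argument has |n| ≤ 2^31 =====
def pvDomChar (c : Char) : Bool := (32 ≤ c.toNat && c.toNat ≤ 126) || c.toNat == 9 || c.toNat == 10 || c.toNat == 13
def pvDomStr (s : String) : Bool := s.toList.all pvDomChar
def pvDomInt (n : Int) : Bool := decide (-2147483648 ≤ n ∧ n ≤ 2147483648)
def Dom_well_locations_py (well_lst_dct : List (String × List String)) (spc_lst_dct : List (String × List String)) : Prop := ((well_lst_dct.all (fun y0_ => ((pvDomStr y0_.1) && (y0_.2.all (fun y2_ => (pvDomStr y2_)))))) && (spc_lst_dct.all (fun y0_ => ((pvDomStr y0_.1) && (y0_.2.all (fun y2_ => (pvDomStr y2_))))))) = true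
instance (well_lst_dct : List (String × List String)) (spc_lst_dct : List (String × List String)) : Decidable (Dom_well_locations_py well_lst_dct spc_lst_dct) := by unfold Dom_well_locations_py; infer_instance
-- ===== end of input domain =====

-- B replaces A's per-well scan of every species list by a species→forms index built in
-- one pass over spc_lst_dct, answering each well by a single dictionary lookup (faster).

-- ===== PORT A =====
def well_locations_py (well_lst_dct : List (String × List String)) (spc_lst_dct : List (String × List String)) : List (String × List String) :=
  -- wells = []; for well_lst in well_lst_dct.values(): wells.extend(well_lst)
  let wells := well_lst_dct.foldl (fun acc p => acc ++ p.2) []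
  -- for well in wells: form_lst = [...]; wells_in_pes.update({well: form_lst})
  let wells_in_pes := wells.foldl (fun (d : PySem.Dict String (List String)) well =>
      let form_lst := spc_lst_dct.foldl
        (fun fl p => if p.2.contains well then fl ++ [p.1] else fl) ([] : List String)
      d.insert well form_lst) PySem.Dict.empty
  -- msurf_wells = {well: forms for (well, forms) in wells_in_pes.items() if len(forms) > 1}
  let msurf_wells := wells_in_pes.items.foldl (fun (m : PySem.Dict String (List String)) p =>
      if p.2.length > 1 then m.insert p.1 p.2 else m) PySem.Dict.empty
  msurf_wells.items

-- ===== PORT B =====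
def well_locations_py_alt (well_lst_dct : List (String × List String)) (spc_lst_dct : List (String × List String)) : List (String × List String) :=
  -- for pes_form, spc_lst in spc_lst_dct.items():
  --   for spc in dict.fromkeys(spc_lst): spc_forms.setdefault(spc, []).append(pes_form)
  let spc_forms := spc_lst_dct.foldl (fun (d : PySem.Dict String (List String)) p =>
      (PySem.List.dedup p.2).foldl (fun d spc => d.modify spc [] (fun l => l ++ [p.1])) d)
      PySem.Dict.empty
  -- for well_lst in well_lst_dct.values(): for well in well_lst:
  --   forms = spc_forms.get(well, []); if len(forms) > 1: msurf_wells[well] = forms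
  let msurf_wells := well_lst_dct.foldl (fun (m : PySem.Dict String (List String)) p =>
      p.2.foldl (fun m well =>
        let forms := spc_forms.getD well []
        if forms.length > 1 then m.insert well forms else m) m) PySem.Dict.empty
  msurf_wells.items

-- ===== PRECONDITION & SPEC =====
def Spec_well_locations_py (well_lst_dct : List (String × List String)) (spc_lst_dct : List (String × List String)) (out : List (String × List String)) : Prop := out = well_locations_py_alt well_lst_dct spc_lst_dct
instance (well_lst_dct : List (String × List String)) (spc_lst_dct : List (String × List String)) (out : List (String × List String)) : Decidable (Spec_well_locations_py well_lst_dct spc_lst_dct out) := by unfold Spec_well_locations_py; infer_instance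

-- ===== CLAIM (what is proved, stated in full; the proofs are below) =====
def Claim_equal_well_locations_py : Prop := ∀ (well_lst_dct : List (String × List String)) (spc_lst_dct : List (String × List String)), Dom_well_locations_py well_lst_dct spc_lst_dct → Spec_well_locations_py well_lst_dct spc_lst_dct (well_locations_py well_lst_dct spc_lst_dct)

-- ===== LEMMAS AND PROOFS =====

-- A nodup list filtered for one element is that element (if present) or nothing.
theorem pv_filter_beq_nodup (l : List String) (a : String) (h : l.Nodup) :
    l.filter (fun x => x == a) = if a ∈ l then [a] else [] := by
  induction l with
  | nil => simp
  | cons x xs ih =>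
    rcases List.nodup_cons.mp h with ⟨hx, hxs⟩
    by_cases hxa : x = a
    · subst hxa
      simp [ih hxs, if_neg hx]
    · simp only [List.filter_cons, beq_iff_eq, if_neg hxa, ih hxs, List.mem_cons]
      simp [Ne.symm hxa]

-- The species→forms index of B looks up to exactly A's per-well form list.
theorem pv_sf_getD (s : List (String × List String)) (d : PySem.Dict String (List String))
    (well : String) :
    (s.foldl (fun d p =>
        (PySem.List.dedup p.2).foldl (fun d spc => d.modify spc [] (fun l => l ++ [p.1])) d)
      d).getD well []
    = d.getD well [] ++ (s.filter (fun p => p.2.contains well)).map Prod.fst := by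
  induction s generalizing d with
  | nil => simp
  | cons p rest ih =>
    simp only [List.foldl_cons]
    rw [ih]
    have hinner : ((PySem.List.dedup p.2).foldl
        (fun d spc => d.modify spc [] (fun l => l ++ [p.1])) d).getD well []
        = d.getD well [] ++ (if p.2.contains well then [p.1] else []) := by
      have hm : (PySem.List.dedup p.2).foldl (fun d spc => d.modify spc [] (fun l => l ++ [p.1])) d
          = ((PySem.List.dedup p.2).map (fun spc => (spc, p.1))).foldl
              (fun d q => d.modify q.1 [] (fun l => l ++ [q.2])) d := by
        rw [List.foldl_map]
      rw [hm, PySem.Dict.getD_foldl_modify_append]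
      congr 1
      rw [List.filter_map, List.map_map]
      have : ((fun q : String × String => q.1 == well) ∘ fun spc => (spc, p.1))
          = fun spc => spc == well := rfl
      rw [this, pv_filter_beq_nodup _ _ (PySem.List.nodup_dedup p.2)]
      by_cases hmem : well ∈ p.2
      · simp [hmem]
      · simp [hmem]
    rw [hinner]
    by_cases hmem : well ∈ p.2
    · simp [hmem, List.append_assoc]
    · simp [hmem]

-- A fold of conditional inserts over pairwise-fresh distinct keys appends the filtered pairs.
theorem pv_items_foldl_condInsert (l : List (String × List String))
    (m : PySem.Dict String (List String))
    (hn : (l.map Prod.fst).Nodup) (hf : ∀ k ∈ l.map Prod.fst, m.contains k = false) :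
    (l.foldl (fun m p => if p.2.length > 1 then m.insert p.1 p.2 else m) m).items
      = m.items ++ l.filter (fun p => p.2.length > 1) := by
  induction l generalizing m with
  | nil => simp
  | cons p rest ih =>
    simp only [List.map_cons, List.nodup_cons] at hn
    have hfp : m.contains p.1 = false := hf p.1 (by simp)
    have hfr : ∀ k ∈ rest.map Prod.fst, m.contains k = false := fun k hk =>
      hf k (by simp [hk])
    simp only [List.foldl_cons, List.filter_cons]
    by_cases hP : p.2.length > 1
    · rw [if_pos hP]
      have hfr' : ∀ k ∈ rest.map Prod.fst, (m.insert p.1 p.2).contains k = false := by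
        intro k hk
        rw [PySem.Dict.contains_insert]
        have : k ≠ p.1 := fun h => hn.1 (h ▸ hk)
        simp [this, hfr k hk]
      rw [ih (m.insert p.1 p.2) hn.2 hfr',
        PySem.Dict.items_insert_of_not_contains m p.2 hfp]
      simp [hP]
    · rw [if_neg hP, ih m hn.2 hfr]
      simp [hP]

-- Core invariant: B's conditional-insert fold tracks the filtered items of A's insert fold.
theorem pv_condInsert_tracks (g : String → List String)
    (xs : List String) (dA dB : PySem.Dict String (List String))
    (hv : ∀ p ∈ dA.items, p.2 = g p.1)
    (hB : dB.items = dA.items.filter (fun p => p.2.length > 1)) :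
    (xs.foldl (fun m x => if (g x).length > 1 then m.insert x (g x) else m) dB).items
      = (xs.foldl (fun d x => d.insert x (g x)) dA).items.filter (fun p => p.2.length > 1) := by
  induction xs generalizing dA dB with
  | nil => simpa using hB
  | cons x rest ih =>
    simp only [List.foldl_cons]
    have hv' : ∀ p ∈ (dA.insert x (g x)).items, p.2 = g p.1 := by
      intro p hp
      rcases (PySem.Dict.mem_items_insert dA x (g x) p).mp hp with h | ⟨h, _⟩
      · rw [h]
      · exact hv p h
    by_cases hc : dA.contains x = true
    · -- x already indexed in dA: its stored value is already g x, inserts are no-ops on items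
      have hid : (dA.insert x (g x)).items = dA.items := by
        rw [PySem.Dict.items_insert_of_contains dA (g x) hc]
        refine (List.map_congr_left ?_).trans (List.map_id _)
        intro p hp
        by_cases hpx : p.1 = x
        · have : p = (x, g x) := by
            have h2 := hv p hp
            calc p = (p.1, p.2) := rfl
              _ = (x, g x) := by rw [hpx, h2, hpx]
          simp [this]
        · simp [hpx]
      by_cases hP : (g x).length > 1
      · rw [if_pos hP]
        -- dB also contains x, with the same value: its insert is an items no-op too
        have hxmem : (x, g x) ∈ dA.items := by
          have : x ∈ dA.keys := by
            have := PySem.Dict.contains_eq_decide_mem_keys dA x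
            rw [hc] at this; exact of_decide_eq_true this.symm
          simp only [PySem.Dict.keys, List.mem_map] at this
          rcases this with ⟨p, hp, hpx⟩
          have : p = (x, g x) := by
            have h2 := hv p hp
            calc p = (p.1, p.2) := rfl
              _ = (x, g x) := by rw [hpx, h2, hpx]
          exact this ▸ hp
        have hxB : (x, g x) ∈ dB.items := by
          rw [hB]; exact List.mem_filter.mpr ⟨hxmem, by simpa using hP⟩
        have hcB : dB.contains x = true := by
          rw [PySem.Dict.contains_eq_decide_mem_keys]
          simp only [PySem.Dict.keys, List.mem_map]
          exact decide_eq_true ⟨(x, g x), hxB, rfl⟩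
        have hidB : (dB.insert x (g x)).items = dB.items := by
          rw [PySem.Dict.items_insert_of_contains dB (g x) hcB]
          refine (List.map_congr_left ?_).trans (List.map_id _)
          intro p hp
          by_cases hpx : p.1 = x
          · have hpA : p ∈ dA.items := List.mem_filter.mp (hB ▸ hp) |>.1
            have : p = (x, g x) := by
              have h2 := hv p hpA
              calc p = (p.1, p.2) := rfl
                _ = (x, g x) := by rw [hpx, h2, hpx]
            simp [this]
          · simp [hpx]
        exact ih (dA.insert x (g x)) (dB.insert x (g x)) hv' (by rw [hidB, hid, hB])
      · rw [if_neg hP]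
        exact ih (dA.insert x (g x)) dB hv' (by rw [hid, hB])
    · -- fresh key: A appends (x, g x); B appends it iff it passes the filter
      have hc' : dA.contains x = false := by
        cases h : dA.contains x
        · rfl
        · exact absurd h hc
      have hitems : (dA.insert x (g x)).items = dA.items ++ [(x, g x)] :=
        PySem.Dict.items_insert_of_not_contains dA (g x) hc'
      have hcB : dB.contains x = false := by
        rw [PySem.Dict.contains_eq_decide_mem_keys]
        apply decide_eq_false
        intro hmem
        simp only [PySem.Dict.keys, List.mem_map] at hmem
        rcases hmem with ⟨p, hp, hpx⟩
        have hpA : p ∈ dA.items := List.mem_filter.mp (hB ▸ hp) |>.1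
        have : x ∈ dA.keys := by
          simp only [PySem.Dict.keys, List.mem_map]; exact ⟨p, hpA, hpx⟩
        have := PySem.Dict.contains_eq_decide_mem_keys dA x
        rw [hc'] at this
        exact absurd this.symm (by simp [‹x ∈ dA.keys›])
      by_cases hP : (g x).length > 1
      · rw [if_pos hP]
        refine ih (dA.insert x (g x)) (dB.insert x (g x)) hv' ?_
        rw [PySem.Dict.items_insert_of_not_contains dB (g x) hcB, hitems,
          List.filter_append, hB]
        simp [hP]
      · rw [if_neg hP]
        refine ih (dA.insert x (g x)) dB hv' ?_
        rw [hitems, List.filter_append, hB]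
        simp [hP]

-- A nested fold over the values of an association list is a fold over their concatenation.
theorem pv_foldl_foldl (w : List (String × List String))
    (f : PySem.Dict String (List String) → String → PySem.Dict String (List String))
    (m : PySem.Dict String (List String)) :
    w.foldl (fun m p => p.2.foldl f m) m = (w.flatMap Prod.snd).foldl f m := by
  induction w generalizing m with
  | nil => rfl
  | cons p rest ih => simp [List.foldl_append, ih]

-- ===== VERDICT (by name: the statement is the Claim_ definition above) =====
theorem well_locations_py_spec : Claim_equal_well_locations_py := by
  intro w s _
  unfold Spec_well_locations_py
  simp only [well_locations_py, well_locations_py_alt]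
  -- the list of wells both sides iterate over
  rw [PySem.List.foldl_append_eq_flatMap, pv_foldl_foldl, List.nil_append]
  -- A's per-well form list, as a function of the well
  set g : String → List String :=
    fun well => (s.filter (fun p => p.2.contains well)).map Prod.fst with hg
  have hA : (fun (d : PySem.Dict String (List String)) well =>
      d.insert well (s.foldl (fun fl p => if p.2.contains well = true then fl ++ [p.1] else fl) []))
      = fun d well => d.insert well (g well) := by
    funext d well
    rw [PySem.List.foldl_append_if (fun p => p.2.contains well) Prod.fst s []]
    simp [hg]
  have hB : (fun (m : PySem.Dict String (List String)) well =>
      if ((s.foldl (fun d p =>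
          (PySem.List.dedup p.2).foldl (fun d spc => d.modify spc [] (fun l => l ++ [p.1])) d)
        PySem.Dict.empty).getD well []).length > 1
      then m.insert well ((s.foldl (fun d p =>
          (PySem.List.dedup p.2).foldl (fun d spc => d.modify spc [] (fun l => l ++ [p.1])) d)
        PySem.Dict.empty).getD well [])
      else m)
      = fun m well => if (g well).length > 1 then m.insert well (g well) else m := by
    funext m well
    rw [pv_sf_getD s PySem.Dict.empty well]
    simp [hg]
  rw [hA, hB]
  -- A's trimming loop = filtering the items of the full dict
  have hnk : (((w.flatMap Prod.snd).foldl (fun d x => d.insert x (g x)) PySem.Dict.empty).items.map Prod.fst).Nodup := by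
    have := PySem.Dict.nodup_keys_foldl_insert (w.flatMap Prod.snd) (fun _ x => g x)
      PySem.Dict.empty (by simp [PySem.Dict.keys_empty])
    simpa [PySem.Dict.keys] using this
  have hempty : (PySem.Dict.empty : PySem.Dict String (List String)).items = [] := rfl
  rw [pv_items_foldl_condInsert _ PySem.Dict.empty hnk
    (by simp [PySem.Dict.contains_empty])]
  rw [pv_condInsert_tracks g (w.flatMap Prod.snd) PySem.Dict.empty PySem.Dict.empty
    (by simp [hempty]) (by simp [hempty])]
  simp [hempty]
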